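-- pv_equiv track=rewrite | github.com/khw11044/KT-CodingMasters | 고급 10문제/8567. 인간 사각형.py | find_squre
-- ===== SOURCE A (Python) =====
-- def find_squre(lst):
--     if len(lst) < 4:
--         return 0
--     answer = 0
--     for i in range(len(lst)-3):
--         y1, x1 = lst[i][0], lst[i][1]
--         for j in range(i+1, len(lst)-2):
--             y2, x2 = lst[j][0], lst[j][1]
--             if y2==y1:
--                 n = x2-x1
--                 for k in range(j+1, len(lst)-1):
--                     y3, x3 = lst[k][0], lst[k][1]
--                     if (x3==x1) & ((y3-y1)==n):
--                         for l in range(k+1, len(lst)):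
--                             y4, x4 = lst[l][0], lst[l][1]
--                             if ((y4==y3) & (x4==x2)):
--                                 answer = max(answer, (n+1)*(n+1))
--     return answer
-- ===== SOURCE B (Python) =====
-- def find_squre(lst):
--     m = len(lst)
--     if m < 4:
--         return 0
--     first = {}   # (y, x) -> first index with that coordinate
--     last = {}    # (y, x) -> last index with that coordinate
--     for p in range(m):
--         c = (lst[p][0], lst[p][1])
--         if c not in first:
--             first[c] = p
--         last[c] = p
--     best = 0
--     # enumerate the MIDDLE pair (j, k) of the index quadruple i<j<k<l:
--     # j is the top-right point (y, x2), k the bottom-left point (y+n, x1);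
--     # the outer points only need to exist before j / after k.
--     for j in range(m):
--         y, x2 = lst[j][0], lst[j][1]
--         for k in range(j + 1, m):
--             yk, x1 = lst[k][0], lst[k][1]
--             n = x2 - x1
--             if yk - y != n:
--                 continue
--             fi = first.get((y, x1))
--             if fi is None or fi >= j:
--                 continue
--             la = last.get((yk, x2))
--             if la is None or la <= k:
--                 continue
--             best = max(best, (n + 1) * (n + 1))
--     return best
-- ===== Notes on version B (the rewrite author's own statement) =====
-- stated objective: faster
-- what changed: Instead of A's four nested index loops scanning every quadruple, B builds first/last-occurrence dicts keyed by coordinate in one pass and then enumerates only the middle pair (j,k) of the quadruple, deciding the existence of the outer two corners by two O(1) dict lookups.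
-- outside the precondition, e.g. on find_squre([[0, 0], [1, 1], [2, 2], []]): A returns 0, B raises IndexError
import Mathlib
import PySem

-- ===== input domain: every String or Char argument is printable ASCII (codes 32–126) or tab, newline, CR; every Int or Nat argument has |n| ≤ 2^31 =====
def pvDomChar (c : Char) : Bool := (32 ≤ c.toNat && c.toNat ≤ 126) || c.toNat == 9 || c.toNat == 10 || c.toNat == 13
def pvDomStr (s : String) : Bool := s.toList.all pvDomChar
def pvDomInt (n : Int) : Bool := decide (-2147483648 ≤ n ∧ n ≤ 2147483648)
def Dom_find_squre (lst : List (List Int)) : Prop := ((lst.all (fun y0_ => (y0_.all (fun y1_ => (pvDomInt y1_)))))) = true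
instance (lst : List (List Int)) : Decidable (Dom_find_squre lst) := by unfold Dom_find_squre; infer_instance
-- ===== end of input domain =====

-- B replaces A's scan over all index quadruples by first/last-occurrence dicts plus a scan
-- over the middle pair only (objective: faster; the outer two corners become dict lookups).

-- shared subscript helpers: lst[p][0] / lst[p][1]
def pvRow (lst : List (List Int)) (p : Int) : List Int := PySem.List.pyGetD lst p []
def pvY (lst : List (List Int)) (p : Int) : Int := PySem.List.pyGetD (pvRow lst p) 0 0
def pvX (lst : List (List Int)) (p : Int) : Int := PySem.List.pyGetD (pvRow lst p) 1 0

-- ===== PORT A =====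
def find_squre (lst : List (List Int)) : Int :=
  if lst.length < 4 then 0 else
  (PySem.List.pyRange 0 ((lst.length : Int) - 3) 1).foldl (fun answer i =>
    let y1 := pvY lst i
    let x1 := pvX lst i
    (PySem.List.pyRange (i + 1) ((lst.length : Int) - 2) 1).foldl (fun answer j =>
      let y2 := pvY lst j
      let x2 := pvX lst j
      if y2 == y1 then
        let n := x2 - x1
        (PySem.List.pyRange (j + 1) ((lst.length : Int) - 1) 1).foldl (fun answer k =>
          let y3 := pvY lst k
          let x3 := pvX lst k
          if (x3 == x1) && ((y3 - y1) == n) then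
            (PySem.List.pyRange (k + 1) (lst.length : Int) 1).foldl (fun answer l =>
              let y4 := pvY lst l
              let x4 := pvX lst l
              if (y4 == y3) && (x4 == x2) then max answer ((n + 1) * (n + 1)) else answer)
              answer
          else answer)
          answer
      else answer)
      answer)
    0

-- ===== PORT B =====
-- one pass: first- and last-occurrence index of every coordinate
def pvBuildFL (lst : List (List Int)) :
    PySem.Dict (Int × Int) Int × PySem.Dict (Int × Int) Int :=
  (PySem.List.pyRange 0 (lst.length : Int) 1).foldl
    (fun fl p =>
      let c := (pvY lst p, pvX lst p)
      ((if fl.1.contains c then fl.1 else fl.1.insert c p), fl.2.insert c p))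
    (PySem.Dict.empty, PySem.Dict.empty)

def find_squre_alt (lst : List (List Int)) : Int :=
  if lst.length < 4 then 0 else
  let fl := pvBuildFL lst
  (PySem.List.pyRange 0 (lst.length : Int) 1).foldl (fun best j =>
    let y := pvY lst j
    let x2 := pvX lst j
    (PySem.List.pyRange (j + 1) (lst.length : Int) 1).foldl (fun best k =>
      let yk := pvY lst k
      let x1 := pvX lst k
      let n := x2 - x1
      if yk - y != n then best else
      match fl.1.get? (y, x1) with
      | none => best
      | some fi =>
        if j ≤ fi then best else
        match fl.2.get? (yk, x2) with
        | none => best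
        | some la =>
          if la ≤ k then best else max best ((n + 1) * (n + 1)))
      best)
    0

-- ===== PRECONDITION & SPEC =====
-- Pre_ excludes lists of length ≥ 4 containing a row with fewer than two entries: Python A
-- raises IndexError whenever its data-dependent loops reach such a row, and on the remaining
-- such lists (row never reached) B, which reads every row once, raises instead.
def Pre_find_squre (lst : List (List Int)) : Prop :=
  lst.length < 4 ∨ ∀ row ∈ lst, 2 ≤ row.length
instance (lst : List (List Int)) : Decidable (Pre_find_squre lst) := by
  unfold Pre_find_squre; infer_instance

def pvWitness_find_squre : List (List Int) := [[0, 0], [0, 1], [1, 0], [1, 1]]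

def Spec_find_squre (lst : List (List Int)) (out : Int) : Prop := out = find_squre_alt lst
instance (lst : List (List Int)) (out : Int) : Decidable (Spec_find_squre lst out) := by
  unfold Spec_find_squre; infer_instance

-- ===== CLAIM (what is proved, stated in full; the proofs are below) =====
def Claim_equal_find_squre : Prop :=
  ∀ (lst : List (List Int)), Dom_find_squre lst → Pre_find_squre lst →
    Spec_find_squre lst (find_squre lst)

-- ===== LEMMAS AND PROOFS =====

def pvCoord (lst : List (List Int)) (p : Int) : Int × Int := (pvY lst p, pvX lst p)

-- the scores contributed by valid index quadruples i < j < k < l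
def pvQuad (lst : List (List Int)) (x : Int) : Prop :=
  ∃ i j k l : Int, 0 ≤ i ∧ i < j ∧ j < k ∧ k < l ∧ l < (lst.length : Int) ∧
    pvY lst j = pvY lst i ∧ pvX lst k = pvX lst i ∧
    pvY lst k - pvY lst i = pvX lst j - pvX lst i ∧
    pvY lst l = pvY lst k ∧ pvX lst l = pvX lst j ∧
    x = (pvX lst j - pvX lst i + 1) * (pvX lst j - pvX lst i + 1)

-- generic max-fold lemmas
theorem pvFoldlMax_le (xs : List Int) (a b : Int) (ha : a ≤ b) (h : ∀ x ∈ xs, x ≤ b) :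
    xs.foldl max a ≤ b := by
  induction xs generalizing a with
  | nil => simpa using ha
  | cons x t ih =>
      exact ih _ (max_le ha (h x (by simp))) (fun y hy => h y (by simp [hy]))

theorem pvFoldlMax_congr (xs ys : List Int) (a : Int) (h : ∀ x, x ∈ xs ↔ x ∈ ys) :
    xs.foldl max a = ys.foldl max a := by
  refine le_antisymm ?_ ?_
  · exact pvFoldlMax_le xs a _ (PySem.List.le_foldl_max ys a).1
      (fun x hx => (PySem.List.le_foldl_max ys a).2 x ((h x).mp hx))
  · exact pvFoldlMax_le ys a _ (PySem.List.le_foldl_max xs a).1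
      (fun x hx => (PySem.List.le_foldl_max xs a).2 x ((h x).mpr hx))

-- a fold whose body is itself a max-fold is a max-fold over the flatMap
theorem pvNest {β : Type} (L : List β) (g : β → List Int) (F : Int → β → Int)
    (hF : ∀ a x, F a x = (g x).foldl max a) (a : Int) :
    L.foldl F a = (L.flatMap g).foldl max a := by
  induction L generalizing a with
  | nil => simp
  | cons x t ih => simp [List.foldl_cons, hF, List.foldl_append, ih]

theorem pvMemIteNil {α : Type} (c : Prop) [Decidable c] (l : List α) (x : α) :
    x ∈ (if c then l else []) ↔ c ∧ x ∈ l := by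
  split <;> simp [*]

-- flatMap normal form of port A
def pvScoresA (lst : List (List Int)) : List Int :=
  (PySem.List.pyRange 0 ((lst.length : Int) - 3) 1).flatMap (fun i =>
    (PySem.List.pyRange (i + 1) ((lst.length : Int) - 2) 1).flatMap (fun j =>
      if pvY lst j == pvY lst i then
        (PySem.List.pyRange (j + 1) ((lst.length : Int) - 1) 1).flatMap (fun k =>
          if (pvX lst k == pvX lst i) && ((pvY lst k - pvY lst i) == (pvX lst j - pvX lst i)) then
            (PySem.List.pyRange (k + 1) (lst.length : Int) 1).flatMap (fun l =>
              if (pvY lst l == pvY lst k) && (pvX lst l == pvX lst j) then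
                [(pvX lst j - pvX lst i + 1) * (pvX lst j - pvX lst i + 1)]
              else [])
          else [])
      else []))

theorem pvA_eq (lst : List (List Int)) :
    find_squre lst = if lst.length < 4 then 0 else (pvScoresA lst).foldl max 0 := by
  unfold find_squre pvScoresA
  split
  · rfl
  · refine pvNest _ _ _ ?_ 0
    intro a i
    dsimp only
    refine pvNest _ _ _ ?_ a
    intro a j
    dsimp only
    split_ifs with h1
    · refine pvNest _ _ _ ?_ a
      intro a k
      dsimp only
      split_ifs with h2
      · refine pvNest _ _ _ ?_ a
        intro a l
        dsimp only
        split_ifs with h3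
        · simp
        · simp
      · simp
    · simp

theorem pvMemA (lst : List (List Int)) (x : Int) :
    x ∈ pvScoresA lst ↔ pvQuad lst x := by
  unfold pvScoresA pvQuad
  simp only [List.mem_flatMap, PySem.List.mem_pyRange_one, pvMemIteNil, Bool.and_eq_true,
    beq_iff_eq, List.mem_singleton]
  constructor
  · rintro ⟨i, ⟨hi0, hi3⟩, j, ⟨hj1, hj2⟩, hy, k, ⟨hk1, hk2⟩, ⟨hxk, hyk⟩, l, ⟨hl1, hl2⟩,
      ⟨hyl, hxl⟩, hx⟩
    exact ⟨i, j, k, l, hi0, by omega, by omega, by omega, by omega, hy, hxk, hyk, hyl, hxl, hx⟩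
  · rintro ⟨i, j, k, l, h0, h1, h2, h3, h4, hy, hxk, hyk, hyl, hxl, hx⟩
    exact ⟨i, ⟨h0, by omega⟩, j, ⟨by omega, by omega⟩, hy, k, ⟨by omega, by omega⟩, ⟨hxk, hyk⟩,
      l, ⟨by omega, by omega⟩, ⟨hyl, hxl⟩, hx⟩

-- the two dicts, separately
def pvFStep (lst : List (List Int)) (d : PySem.Dict (Int × Int) Int) (p : Int) :
    PySem.Dict (Int × Int) Int :=
  if d.contains (pvCoord lst p) then d else d.insert (pvCoord lst p) p

def pvLStep (lst : List (List Int)) (d : PySem.Dict (Int × Int) Int) (p : Int) :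
    PySem.Dict (Int × Int) Int :=
  d.insert (pvCoord lst p) p

def pvFirstD (lst : List (List Int)) (t : Nat) : PySem.Dict (Int × Int) Int :=
  (PySem.List.pyRange 0 (t : Int) 1).foldl (pvFStep lst) PySem.Dict.empty

def pvLastD (lst : List (List Int)) (t : Nat) : PySem.Dict (Int × Int) Int :=
  (PySem.List.pyRange 0 (t : Int) 1).foldl (pvLStep lst) PySem.Dict.empty

theorem pvBuildFL_eq (lst : List (List Int)) :
    pvBuildFL lst = (pvFirstD lst lst.length, pvLastD lst lst.length) := by
  unfold pvBuildFL pvFirstD pvLastD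
  exact PySem.List.foldl_prod_mk (f := pvFStep lst) (g := pvLStep lst) _ _ _

theorem pvFirstD_succ (lst : List (List Int)) (t : Nat) :
    pvFirstD lst (t + 1) = pvFStep lst (pvFirstD lst t) (t : Int) := by
  unfold pvFirstD
  rw [show ((t + 1 : Nat) : Int) = (t : Int) + 1 by push_cast; ring,
    PySem.List.pyRange_one_succ_right (Int.natCast_nonneg t), List.foldl_append,
    List.foldl_cons, List.foldl_nil]

theorem pvLastD_succ (lst : List (List Int)) (t : Nat) :
    pvLastD lst (t + 1) = pvLStep lst (pvLastD lst t) (t : Int) := by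
  unfold pvLastD
  rw [show ((t + 1 : Nat) : Int) = (t : Int) + 1 by push_cast; ring,
    PySem.List.pyRange_one_succ_right (Int.natCast_nonneg t), List.foldl_append,
    List.foldl_cons, List.foldl_nil]

theorem pvFirstD_zero (lst : List (List Int)) : pvFirstD lst 0 = PySem.Dict.empty := by
  unfold pvFirstD
  rw [show ((0 : Nat) : Int) = (0 : Int) by norm_num,
    PySem.List.pyRange_one_eq_nil (le_refl (0 : Int)), List.foldl_nil]

theorem pvLastD_zero (lst : List (List Int)) : pvLastD lst 0 = PySem.Dict.empty := by
  unfold pvLastD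
  rw [show ((0 : Nat) : Int) = (0 : Int) by norm_num,
    PySem.List.pyRange_one_eq_nil (le_refl (0 : Int)), List.foldl_nil]

theorem pvFirstD_spec (lst : List (List Int)) (t : Nat) (c : Int × Int) :
    (∀ p : Int, (pvFirstD lst t).get? c = some p ↔
      (0 ≤ p ∧ p < (t : Int) ∧ pvCoord lst p = c ∧
        ∀ q : Int, 0 ≤ q → q < p → pvCoord lst q ≠ c)) ∧
    ((pvFirstD lst t).get? c = none ↔
      ∀ q : Int, 0 ≤ q → q < (t : Int) → pvCoord lst q ≠ c) := by
  induction t generalizing c with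
  | zero =>
      rw [pvFirstD_zero]
      constructor
      · intro p
        simp only [PySem.Dict.get?_empty]
        constructor
        · intro h; cases h
        · rintro ⟨h0, h1, -⟩; exact absurd h1 (by omega)
      · simp only [PySem.Dict.get?_empty, true_iff]
        intro q h0 h1; exact absurd h1 (by omega)
  | succ t ih =>
      rw [pvFirstD_succ]
      unfold pvFStep
      obtain ⟨ihs, ihn⟩ := ih c
      by_cases hc : (pvFirstD lst t).contains (pvCoord lst (t : Int)) = true
      · rw [if_pos hc]
        have hex : ∃ p0, (pvFirstD lst t).get? (pvCoord lst (t : Int)) = some p0 := by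
          rcases h' : (pvFirstD lst t).get? (pvCoord lst (t : Int)) with - | p0
          · rw [PySem.Dict.get?_eq_none_iff_contains] at h'
            rw [h'] at hc; cases hc
          · exact ⟨p0, rfl⟩
        by_cases hcc : c = pvCoord lst (t : Int)
        · subst hcc
          obtain ⟨p0, hp0⟩ := hex
          obtain ⟨hp00, hp0t, hp0c, -⟩ := (ihs p0).mp hp0
          constructor
          · intro p
            rw [ihs p]
            constructor
            · rintro ⟨h0, h1, h2, h3⟩; exact ⟨h0, by omega, h2, h3⟩
            · rintro ⟨h0, h1, h2, h3⟩
              refine ⟨h0, ?_, h2, h3⟩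
              by_contra hpt
              exact h3 p0 hp00 (by omega) hp0c
          · constructor
            · intro hn; rw [hn] at hp0; cases hp0
            · intro hall; exact absurd hp0c (hall p0 hp00 (by omega))
        · have hct : pvCoord lst (t : Int) ≠ c := fun h => hcc h.symm
          constructor
          · intro p
            rw [ihs p]
            constructor
            · rintro ⟨h0, h1, h2, h3⟩; exact ⟨h0, by omega, h2, h3⟩
            · rintro ⟨h0, h1, h2, h3⟩
              refine ⟨h0, ?_, h2, h3⟩
              have hpt : p ≠ (t : Int) := by
                intro hpt; rw [hpt] at h2; exact hcc h2.symm
              omega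
          · rw [ihn]
            constructor
            · intro hall q h0 h1
              by_cases hq : q = (t : Int)
              · rw [hq]; exact hct
              · exact hall q h0 (by omega)
            · intro hall q h0 h1; exact hall q h0 (by omega)
      · rw [if_neg hc]
        have hcf : (pvFirstD lst t).contains (pvCoord lst (t : Int)) = false := by
          cases h : (pvFirstD lst t).contains (pvCoord lst (t : Int))
          · rfl
          · exact absurd h hc
        have hnone : (pvFirstD lst t).get? (pvCoord lst (t : Int)) = none := by
          rw [PySem.Dict.get?_eq_none_iff_contains]; exact hcf
        have hfresh : ∀ q : Int, 0 ≤ q → q < (t : Int) → pvCoord lst q ≠ pvCoord lst (t : Int) :=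
          (ih (pvCoord lst (t : Int))).2.mp hnone
        by_cases hcc : c = pvCoord lst (t : Int)
        · subst hcc
          constructor
          · intro p
            rw [PySem.Dict.get?_insert, if_pos rfl]
            constructor
            · intro h
              obtain rfl := Option.some.inj h
              refine ⟨by omega, by omega, rfl, ?_⟩
              intro q h0 h1; exact hfresh q h0 (by omega)
            · rintro ⟨h0, h1, h2, h3⟩
              by_cases hpt : p = (t : Int)
              · rw [hpt]
              · exact absurd h2 (hfresh p h0 (by omega))
          · rw [PySem.Dict.get?_insert, if_pos rfl]
            constructor
            · intro h; cases h
            · intro hall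
              exact absurd rfl (hall (t : Int) (by omega) (by omega))
        · have hct : pvCoord lst (t : Int) ≠ c := fun h => hcc h.symm
          constructor
          · intro p
            rw [PySem.Dict.get?_insert, if_neg hcc, ihs p]
            constructor
            · rintro ⟨h0, h1, h2, h3⟩; exact ⟨h0, by omega, h2, h3⟩
            · rintro ⟨h0, h1, h2, h3⟩
              refine ⟨h0, ?_, h2, h3⟩
              have hpt : p ≠ (t : Int) := by
                intro hpt; rw [hpt] at h2; exact hcc h2.symm
              omega
          · rw [PySem.Dict.get?_insert, if_neg hcc, ihn]
            constructor
            · intro hall q h0 h1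
              by_cases hq : q = (t : Int)
              · rw [hq]; exact hct
              · exact hall q h0 (by omega)
            · intro hall q h0 h1; exact hall q h0 (by omega)

theorem pvLastD_spec (lst : List (List Int)) (t : Nat) (c : Int × Int) :
    (∀ p : Int, (pvLastD lst t).get? c = some p ↔
      (0 ≤ p ∧ p < (t : Int) ∧ pvCoord lst p = c ∧
        ∀ q : Int, p < q → q < (t : Int) → pvCoord lst q ≠ c)) ∧
    ((pvLastD lst t).get? c = none ↔
      ∀ q : Int, 0 ≤ q → q < (t : Int) → pvCoord lst q ≠ c) := by
  induction t with
  | zero =>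
      rw [pvLastD_zero]
      constructor
      · intro p
        simp only [PySem.Dict.get?_empty]
        constructor
        · intro h; cases h
        · rintro ⟨h0, h1, -⟩; exact absurd h1 (by omega)
      · simp only [PySem.Dict.get?_empty, true_iff]
        intro q h0 h1; exact absurd h1 (by omega)
  | succ t ih =>
      rw [pvLastD_succ]
      unfold pvLStep
      obtain ⟨ihs, ihn⟩ := ih
      by_cases hcc : c = pvCoord lst (t : Int)
      · subst hcc
        constructor
        · intro p
          rw [PySem.Dict.get?_insert, if_pos rfl]
          constructor
          · intro h
            obtain rfl := Option.some.inj h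
            refine ⟨by omega, by omega, rfl, ?_⟩
            intro q h0 h1; exact absurd h1 (by omega)
          · rintro ⟨h0, h1, h2, h3⟩
            by_cases hpt : p = (t : Int)
            · rw [hpt]
            · exact absurd rfl (h3 (t : Int) (by omega) (by omega))
        · rw [PySem.Dict.get?_insert, if_pos rfl]
          constructor
          · intro h; cases h
          · intro hall
            exact absurd rfl (hall (t : Int) (by omega) (by omega))
      · have hct : pvCoord lst (t : Int) ≠ c := fun h => hcc h.symm
        constructor
        · intro p
          rw [PySem.Dict.get?_insert, if_neg hcc, ihs p]
          constructor
          · rintro ⟨h0, h1, h2, h3⟩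
            refine ⟨h0, by omega, h2, ?_⟩
            intro q hq0 hq1
            by_cases hq : q = (t : Int)
            · rw [hq]; exact hct
            · exact h3 q hq0 (by omega)
          · rintro ⟨h0, h1, h2, h3⟩
            have hpt : p ≠ (t : Int) := by
              intro hpt; rw [hpt] at h2; exact hcc h2.symm
            refine ⟨h0, by omega, h2, ?_⟩
            intro q hq0 hq1; exact h3 q hq0 (by omega)
        · rw [PySem.Dict.get?_insert, if_neg hcc, ihn]
          constructor
          · intro hall q h0 h1
            by_cases hq : q = (t : Int)
            · rw [hq]; exact hct
            · exact hall q h0 (by omega)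
          · intro hall q h0 h1; exact hall q h0 (by omega)

-- flatMap normal form of port B
def pvScoresB (lst : List (List Int)) : List Int :=
  (PySem.List.pyRange 0 (lst.length : Int) 1).flatMap (fun j =>
    (PySem.List.pyRange (j + 1) (lst.length : Int) 1).flatMap (fun k =>
      if pvY lst k - pvY lst j != pvX lst j - pvX lst k then [] else
      match (pvFirstD lst lst.length).get? (pvY lst j, pvX lst k) with
      | none => []
      | some fi =>
        if j ≤ fi then [] else
        match (pvLastD lst lst.length).get? (pvY lst k, pvX lst j) with
        | none => []
        | some la =>
          if la ≤ k then [] else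
            [(pvX lst j - pvX lst k + 1) * (pvX lst j - pvX lst k + 1)]))

theorem pvB_eq (lst : List (List Int)) :
    find_squre_alt lst = if lst.length < 4 then 0 else (pvScoresB lst).foldl max 0 := by
  unfold find_squre_alt pvScoresB
  split
  · rfl
  · dsimp only
    rw [pvBuildFL_eq]
    dsimp only
    refine pvNest _ _ _ ?_ 0
    intro a j
    dsimp only
    refine pvNest _ _ _ ?_ a
    intro a k
    dsimp only
    split_ifs with h1
    · simp
    · cases hfi : (pvFirstD lst lst.length).get? (pvY lst j, pvX lst k) with
      | none => simp
      | some fi =>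
        dsimp only
        split_ifs with h2
        · simp
        · cases hla : (pvLastD lst lst.length).get? (pvY lst k, pvX lst j) with
          | none => simp
          | some la =>
            dsimp only
            split_ifs with h3
            · simp
            · simp

theorem pvMemBInner (lst : List (List Int)) (j k x : Int) :
    (x ∈ (if pvY lst k - pvY lst j != pvX lst j - pvX lst k then [] else
      match (pvFirstD lst lst.length).get? (pvY lst j, pvX lst k) with
      | none => []
      | some fi =>
        if j ≤ fi then [] else
        match (pvLastD lst lst.length).get? (pvY lst k, pvX lst j) with
        | none => []
        | some la =>
          if la ≤ k then [] else
            [(pvX lst j - pvX lst k + 1) * (pvX lst j - pvX lst k + 1)])) ↔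
    (pvY lst k - pvY lst j = pvX lst j - pvX lst k ∧
      ∃ fi, (pvFirstD lst lst.length).get? (pvY lst j, pvX lst k) = some fi ∧ fi < j ∧
      ∃ la, (pvLastD lst lst.length).get? (pvY lst k, pvX lst j) = some la ∧ k < la ∧
      x = (pvX lst j - pvX lst k + 1) * (pvX lst j - pvX lst k + 1)) := by
  split_ifs with h1
  · simp only [List.not_mem_nil, false_iff]
    rintro ⟨heq, -⟩
    exact (bne_iff_ne.mp h1) heq
  · have heq : pvY lst k - pvY lst j = pvX lst j - pvX lst k := by
      simpa [bne_iff_ne] using h1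
    cases hfi : (pvFirstD lst lst.length).get? (pvY lst j, pvX lst k) with
    | none => simp [heq]
    | some fi =>
      dsimp only
      split_ifs with h2
      · simp only [List.not_mem_nil, false_iff]
        rintro ⟨-, fi', hfi', hlt, -⟩
        injection hfi' with h
        omega
      · cases hla : (pvLastD lst lst.length).get? (pvY lst k, pvX lst j) with
        | none => simp [heq]
        | some la =>
          dsimp only
          split_ifs with h3
          · simp only [List.not_mem_nil, false_iff]
            rintro ⟨-, fi', hfi', -, la', hla', hlt, -⟩
            injection hla' with h
            omega
          · simp only [List.mem_singleton]
            constructor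
            · intro hx
              exact ⟨heq, fi, rfl, by omega, la, rfl, by omega, hx⟩
            · rintro ⟨-, fi', hfi', -, la', hla', -, hx⟩
              exact hx

theorem pvMemB (lst : List (List Int)) (x : Int) :
    x ∈ pvScoresB lst ↔ pvQuad lst x := by
  unfold pvScoresB pvQuad
  simp only [List.mem_flatMap, PySem.List.mem_pyRange_one, pvMemBInner]
  constructor
  · rintro ⟨j, ⟨hj0, hjm⟩, k, ⟨hk1, hkm⟩, heq, fi, hfi, hfij, la, hla, hkla, hx⟩
    obtain ⟨hfi0, hfim, hfic, -⟩ :=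
      ((pvFirstD_spec lst lst.length (pvY lst j, pvX lst k)).1 fi).mp hfi
    obtain ⟨hla0, hlam, hlac, -⟩ :=
      ((pvLastD_spec lst lst.length (pvY lst k, pvX lst j)).1 la).mp hla
    rw [pvCoord, Prod.mk.injEq] at hfic hlac
    obtain ⟨hfy, hfx⟩ := hfic
    obtain ⟨hly, hlx⟩ := hlac
    refine ⟨fi, j, k, la, hfi0, hfij, by omega, hkla, hlam, hfy.symm, hfx.symm,
      by omega, hly, hlx, ?_⟩
    rw [hfx]; exact hx
  · rintro ⟨i, j, k, l, hi0, hij, hjk, hkl, hlm, hy, hxk, hyk2, hyl, hxl, hx⟩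
    refine ⟨j, ⟨by omega, by omega⟩, k, ⟨by omega, by omega⟩, by omega, ?_⟩
    have hcoordi : pvCoord lst i = (pvY lst j, pvX lst k) := by
      rw [pvCoord, Prod.mk.injEq]; exact ⟨hy.symm, hxk.symm⟩
    have hcoordl : pvCoord lst l = (pvY lst k, pvX lst j) := by
      rw [pvCoord, Prod.mk.injEq]; exact ⟨hyl, hxl⟩
    obtain ⟨fspec, fnone⟩ := pvFirstD_spec lst lst.length (pvY lst j, pvX lst k)
    rcases hfi : (pvFirstD lst lst.length).get? (pvY lst j, pvX lst k) with - | fi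
    · exact absurd hcoordi (fnone.mp hfi i hi0 (by omega))
    · obtain ⟨hfi0, hfim, hfic, hmin⟩ := (fspec fi).mp hfi
      have hfij : fi < j := by
        by_contra hge
        exact hmin i hi0 (by omega) hcoordi
      refine ⟨fi, rfl, hfij, ?_⟩
      obtain ⟨lspec, lnone⟩ := pvLastD_spec lst lst.length (pvY lst k, pvX lst j)
      rcases hla : (pvLastD lst lst.length).get? (pvY lst k, pvX lst j) with - | la
      · exact absurd hcoordl (lnone.mp hla l (by omega) hlm)
      · obtain ⟨hla0, hlam, hlac, hmax⟩ := (lspec la).mp hla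
        have hkla : k < la := by
          by_contra hge
          exact hmax l (by omega) hlm hcoordl
        refine ⟨la, rfl, hkla, ?_⟩
        rw [hxk]; exact hx

-- ===== VERDICT (by name: the statement is the Claim_ definition above) =====
theorem find_squre_spec : Claim_equal_find_squre := by
  intro lst _ _
  unfold Spec_find_squre
  rw [pvA_eq, pvB_eq]
  split
  · rfl
  · exact pvFoldlMax_congr _ _ _ (fun x => (pvMemA lst x).trans (pvMemB lst x).symm)
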